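-- pv_equiv track=rewrite | github.com/popoet/crispr_test_project | backend_software/hitom/new/report.py | find_gap_regions
-- ===== SOURCE A (Python) =====
-- def find_gap_regions(reference_sequence):
--     """
--     统计 reference_sequence 中连续 '-' 的区间。
--     """
--     gap_regions = []
--     in_gap = False
--     start = 0
--
--     for i, char in enumerate(reference_sequence):
--         if char == '-' and not in_gap:
--             in_gap = True
--             start = i
--         elif char != '-' and in_gap:
--             in_gap = False
--             gap_regions.append((start, i - 1))
--
--     if in_gap:
--         gap_regions.append((start, len(reference_sequence) - 1))
--
--     return gap_regions
-- ===== SOURCE B (Python) =====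
-- def find_gap_regions(reference_sequence):
--     """Run-scanning re-implementation: find each dash run in one inner scan."""
--     gap_regions = []
--     i = 0
--     n = len(reference_sequence)
--     while i < n:
--         if reference_sequence[i] == '-':
--             j = i + 1
--             while j < n and reference_sequence[j] == '-':
--                 j += 1
--             gap_regions.append((i, j - 1))
--             i = j
--         else:
--             i += 1
--     return gap_regions
-- ===== Notes on version B (the rewrite author's own statement) =====
-- stated objective: alternative
-- what changed: Replaces A's single-pass boolean in_gap state machine (flag + start + trailing-gap fixup) with a stateless run-scanning loop that, at each dash, scans the whole dash run with an inner loop and emits the interval immediately.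
import Mathlib
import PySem

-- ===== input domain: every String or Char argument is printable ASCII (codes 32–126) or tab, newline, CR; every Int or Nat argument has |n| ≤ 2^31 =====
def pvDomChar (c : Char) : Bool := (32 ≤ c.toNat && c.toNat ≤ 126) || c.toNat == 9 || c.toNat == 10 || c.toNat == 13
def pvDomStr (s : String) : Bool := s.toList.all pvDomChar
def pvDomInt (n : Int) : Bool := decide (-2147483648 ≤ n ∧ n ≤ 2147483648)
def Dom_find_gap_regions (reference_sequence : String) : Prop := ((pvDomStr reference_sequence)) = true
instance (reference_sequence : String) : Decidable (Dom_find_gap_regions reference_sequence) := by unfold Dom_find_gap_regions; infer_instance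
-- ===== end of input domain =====

-- B replaces A's in_gap flag state machine with a run-scanning loop (alternative decomposition, same cost).


-- ===== PORT A =====
-- A's loop: state (accumulated regions, in_gap flag, start); i is the enumerate index.
def aLoop : List Char → Int → Bool → Int → List (Int × Int) → List (Int × Int) × Bool × Int
  | [], _, g, s, acc => (acc, g, s)
  | c :: rest, i, g, s, acc =>
    if c = '-' ∧ g = false then aLoop rest (i + 1) true i acc
    else if c ≠ '-' ∧ g = true then aLoop rest (i + 1) false s (acc ++ [(s, i - 1)])
    else aLoop rest (i + 1) g s acc

def find_gap_regions (reference_sequence : String) : List (Int × Int) :=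
  let l := reference_sequence.toList
  match aLoop l 0 false 0 [] with
  | (acc, g, s) => if g then acc ++ [(s, (l.length : Int) - 1)] else acc

-- ===== PORT B =====
-- B's outer while loop: at a dash, the inner while (ported as takeWhile on the tail) finds the
-- run end j = i + k + 1, emits (i, j - 1) and resumes at j; otherwise steps to i + 1.
def altGo (l : List Char) (i : Int) : List (Int × Int) :=
  match l with
  | [] => []
  | c :: rest =>
    if c = '-' then
      let k := (rest.takeWhile (fun ch => ch = '-')).length
      (i, i + (k : Int)) :: altGo (rest.drop k) (i + (k : Int) + 1)
    else altGo rest (i + 1)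
termination_by l.length
decreasing_by
  · simp only [List.length_drop, List.length_cons]; omega
  · simp

def find_gap_regions_alt (reference_sequence : String) : List (Int × Int) :=
  altGo reference_sequence.toList 0

-- ===== PRECONDITION & SPEC =====
def Spec_find_gap_regions (reference_sequence : String) (out : List (Int × Int)) : Prop := out = find_gap_regions_alt reference_sequence
instance (reference_sequence : String) (out : List (Int × Int)) : Decidable (Spec_find_gap_regions reference_sequence out) := by unfold Spec_find_gap_regions; infer_instance

-- ===== CLAIM (what is proved, stated in full; the proofs are below) =====
def Claim_equal_find_gap_regions : Prop := ∀ (reference_sequence : String), Dom_find_gap_regions reference_sequence → Spec_find_gap_regions reference_sequence (find_gap_regions reference_sequence)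

-- ===== LEMMAS AND PROOFS =====

-- A's post-loop fixup: append the trailing gap if the loop ended inside one (n = total length).
def finishA (r : List (Int × Int) × Bool × Int) (n : Int) : List (Int × Int) :=
  if r.2.1 then r.1 ++ [(r.2.2, n - 1)] else r.1

-- What B produces from inside a gap that started at s, with l the remaining characters at index i.
def gapCont (l : List Char) (i s : Int) : List (Int × Int) :=
  let k := (l.takeWhile (fun ch => ch = '-')).length
  (s, i + (k : Int) - 1) :: altGo (l.drop k) (i + (k : Int))

theorem aLoop_altGo (l : List Char) :
    (∀ (i s : Int) (acc : List (Int × Int)),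
        finishA (aLoop l i false s acc) (i + l.length) = acc ++ altGo l i) ∧
    (∀ (i s : Int) (acc : List (Int × Int)),
        finishA (aLoop l i true s acc) (i + l.length) = acc ++ gapCont l i s) := by
  induction l with
  | nil =>
    constructor <;> intro i s acc <;>
      simp [aLoop, altGo, gapCont, finishA]
  | cons c rest ih =>
    have harith1 : ∀ i : Int, i + ((c :: rest).length : Int) = (i + 1) + rest.length := by
      intro i; simp; ring
    have h1 : ∀ (i s : Int) (acc : List (Int × Int)),
        finishA (aLoop (c :: rest) i false s acc) (i + (c :: rest).length) = acc ++ altGo (c :: rest) i := by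
      intro i s acc
      rw [harith1]
      by_cases hc : c = '-'
      · subst hc
        rw [show aLoop ('-' :: rest) i false s acc = aLoop rest (i + 1) true i acc from by
          simp [aLoop]]
        rw [ih.2 (i + 1) i acc]
        rw [show altGo ('-' :: rest) i
            = (i, i + ((rest.takeWhile (fun ch => ch = '-')).length : Int)) ::
              altGo (rest.drop (rest.takeWhile (fun ch => ch = '-')).length)
                (i + ((rest.takeWhile (fun ch => ch = '-')).length : Int) + 1) from by
          simp [altGo]]
        simp only [gapCont]
        have e1 : i + 1 + ((rest.takeWhile (fun ch => ch = '-')).length : Int) - 1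
            = i + ((rest.takeWhile (fun ch => ch = '-')).length : Int) := by ring
        have e2 : i + 1 + ((rest.takeWhile (fun ch => ch = '-')).length : Int)
            = i + ((rest.takeWhile (fun ch => ch = '-')).length : Int) + 1 := by ring
        rw [e1, e2]
      · rw [show aLoop (c :: rest) i false s acc = aLoop rest (i + 1) false s acc from by
          simp [aLoop, hc]]
        rw [ih.1 (i + 1) s acc]
        congr 1
        simp [altGo, hc]
    refine ⟨h1, ?_⟩
    intro i s acc
    rw [harith1]
    by_cases hc : c = '-'
    · subst hc
      rw [show aLoop ('-' :: rest) i true s acc = aLoop rest (i + 1) true s acc from by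
        simp [aLoop]]
      rw [ih.2 (i + 1) s acc]
      congr 1
      have hk : ((('-' :: rest).takeWhile (fun ch => ch = '-')).length)
          = (rest.takeWhile (fun ch => ch = '-')).length + 1 := by
        simp
      simp only [gapCont, hk, List.drop_succ_cons]
      have e1 : i + (((rest.takeWhile (fun ch => ch = '-')).length + 1 : ℕ) : Int) - 1
          = i + 1 + ((rest.takeWhile (fun ch => ch = '-')).length : Int) - 1 := by push_cast; ring
      have e2 : i + (((rest.takeWhile (fun ch => ch = '-')).length + 1 : ℕ) : Int)
          = i + 1 + ((rest.takeWhile (fun ch => ch = '-')).length : Int) := by push_cast; ring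
      rw [e1, e2]
    · rw [show aLoop (c :: rest) i true s acc
          = aLoop rest (i + 1) false s (acc ++ [(s, i - 1)]) from by
        simp [aLoop, hc]]
      rw [ih.1 (i + 1) s (acc ++ [(s, i - 1)])]
      have hk : (((c :: rest).takeWhile (fun ch => ch = '-')).length) = 0 := by
        simp [hc]
      simp only [gapCont, hk, List.drop_zero, Nat.cast_zero, add_zero]
      rw [show altGo (c :: rest) i = altGo rest (i + 1) from by simp [altGo, hc]]
      simp

-- ===== VERDICT (by name: the statement is the Claim_ definition above) =====
theorem find_gap_regions_spec : Claim_equal_find_gap_regions := by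
  intro rs _
  unfold Spec_find_gap_regions find_gap_regions find_gap_regions_alt
  have h := (aLoop_altGo rs.toList).1 0 0 []
  simp only [zero_add, List.nil_append] at h
  rw [← h]
  rcases hE : aLoop rs.toList 0 false 0 [] with ⟨acc, g, s⟩
  simp only [finishA, hE]
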